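-- pv_equiv track=rewrite | github.com/vincentl/linea | src/linea.py | find_interior
-- ===== SOURCE A (Python) =====
-- def bounding_box(pixels):
--     '''
--     pixels is a list of xy pairs and this function computes a bounded box for the pixels
--     '''
--     x = [p[0] for p in pixels]
--     y = [p[1] for p in pixels]
--     return (min(x), min(y)), (max(x), max(y))
--
-- def find_interior(edge):
--     '''
--     starting from a list of edge vertices defining the boundary, generate all internal (x,y) pairs
--
--     (x,y)-(x,y+1) [x,y] (x+1,y)-(x+1,y+1) [x+1,y] (x+2,y)-(x+2,y+1)
--     x_min/y_min may be coordinate for interior pixel, but x_max,y_max are not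
--     '''
--     (x_min, y_min), (x_max, y_max) = bounding_box(edge)
--     boundary = set([src if src[1] < dst[1] else dst for src, dst in zip(edge, edge[1:] + [edge[-1]]) if src[0] == dst[0]])
--     interior = []
--     for y in range(y_min, y_max):
--         inside = (x_min,y) in boundary
--         for x in range(x_min, x_max):
--             if inside:
--                 interior += [(x,y)]
--             inside ^= (x+1,y) in boundary
--     return interior
-- ===== SOURCE B (Python) =====
-- def find_interior(edge):
--     # Output-sensitive scanline: index boundary x's per row, sort, fill runs
--     # between parity toggles (A scans every pixel of the bounding box).
--     x_max = max(p[0] for p in edge)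
--     y_max = max(p[1] for p in edge)
--     bpts = set(s if s[1] < d[1] else d for s, d in zip(edge, edge[1:] + [edge[-1]]) if s[0] == d[0])
--     interior = []
--     for y in sorted(set(p[1] for p in bpts if p[1] < y_max)):
--         xs = sorted(x for (x, yy) in bpts if yy == y)
--         for i in range(0, len(xs), 2):
--             hi = xs[i + 1] if i + 1 < len(xs) else x_max
--             for x in range(xs[i], hi):
--                 interior.append((x, y))
--     return interior
-- ===== Notes on version B (the rewrite author's own statement) =====
-- stated objective: faster
-- what changed: A sweeps every pixel of the bounding box per row while toggling an inside flag; B indexes the boundary x's per row, sorts each row's toggles, and emits the runs between consecutive parity toggles directly, visiting only rows that contain boundary points (output-sensitive scanline).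
import Mathlib
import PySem

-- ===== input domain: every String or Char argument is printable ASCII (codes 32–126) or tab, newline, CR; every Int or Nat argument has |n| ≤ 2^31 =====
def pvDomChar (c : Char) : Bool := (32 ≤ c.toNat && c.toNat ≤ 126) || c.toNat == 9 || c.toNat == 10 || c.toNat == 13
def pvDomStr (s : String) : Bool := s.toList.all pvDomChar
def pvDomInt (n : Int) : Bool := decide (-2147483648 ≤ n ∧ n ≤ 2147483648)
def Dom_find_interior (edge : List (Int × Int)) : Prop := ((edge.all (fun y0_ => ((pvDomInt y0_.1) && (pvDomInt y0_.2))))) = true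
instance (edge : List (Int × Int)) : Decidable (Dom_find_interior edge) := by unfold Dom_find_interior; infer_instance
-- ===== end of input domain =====

-- B replaces A's per-pixel sweep of the whole bounding box by an output-sensitive
-- scanline: boundary x's are grouped per row, sorted, and runs between parity
-- toggles are emitted directly (objective: faster).

-- ===== PORT A =====
def find_interior (edge : List (Int × Int)) : List (Int × Int) :=
  match PySem.List.min? (edge.map Prod.fst) (fun v => v),
        PySem.List.min? (edge.map Prod.snd) (fun v => v),
        PySem.List.max? (edge.map Prod.fst) (fun v => v),
        PySem.List.max? (edge.map Prod.snd) (fun v => v),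
        PySem.List.pyGet? edge (-1) with
  | some x_min, some y_min, some x_max, some y_max, some last =>
      let boundary : PySem.Set (Int × Int) :=
        PySem.Set.ofList (((edge.zip (edge.tail ++ [last])).filter
            (fun sd => sd.1.1 == sd.2.1)).map (fun sd => if sd.1.2 < sd.2.2 then sd.1 else sd.2))
      (PySem.List.pyRange y_min y_max 1).foldl (fun interior y =>
        ((PySem.List.pyRange x_min x_max 1).foldl
          (fun (st : Bool × List (Int × Int)) x =>
            (st.1 ^^ PySem.Set.contains boundary (x + 1, y),
             if st.1 then st.2 ++ [(x, y)] else st.2))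
          (PySem.Set.contains boundary (x_min, y), interior)).2) []
  | _, _, _, _, _ => []

-- ===== PORT B =====
-- the 'while xs: … ; xs = xs[2:]' loop of Source B
def pvFillRow (x_max y : Int) : List Int → List (Int × Int) → List (Int × Int)
  | [], interior => interior
  | [lo], interior =>
      (PySem.List.pyRange lo x_max 1).foldl (fun a x => a ++ [(x, y)]) interior
  | lo :: hi :: rest, interior =>
      pvFillRow x_max y rest
        ((PySem.List.pyRange lo hi 1).foldl (fun a x => a ++ [(x, y)]) interior)

def find_interior_alt (edge : List (Int × Int)) : List (Int × Int) :=
  match PySem.List.max? (edge.map Prod.fst) (fun v => v) with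
  | none => []
  | some x_max =>
    match PySem.List.max? (edge.map Prod.snd) (fun v => v) with
    | none => []
    | some y_max =>
      match PySem.List.pyGet? edge (-1) with
      | none => []
      | some last =>
        let bpts : PySem.Set (Int × Int) :=
          PySem.Set.ofList (((edge.zip (edge.tail ++ [last])).filter
              (fun sd => sd.1.1 == sd.2.1)).map (fun sd => if sd.1.2 < sd.2.2 then sd.1 else sd.2))
        let ys := PySem.List.sorted
          (PySem.Set.ofList ((bpts.filter (fun p => decide (p.2 < y_max))).map Prod.snd))
          (fun v => v) false
        ys.foldl (fun interior y =>
          let xs := PySem.List.sorted ((bpts.filter (fun p => p.2 == y)).map Prod.fst)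
            (fun v => v) false
          pvFillRow x_max y xs interior) []

-- ===== PRECONDITION & SPEC =====
-- A raises ValueError (min of an empty sequence) / IndexError (edge[-1]) on the empty list.
def Pre_find_interior (edge : List (Int × Int)) : Prop := edge ≠ []
instance (edge : List (Int × Int)) : Decidable (Pre_find_interior edge) := by unfold Pre_find_interior; infer_instance
def pvWitness_find_interior : (List (Int × Int)) := [(0, 0), (0, 2), (2, 2), (2, 0), (0, 0)]

def Spec_find_interior (edge : List (Int × Int)) (out : List (Int × Int)) : Prop := out = find_interior_alt edge
instance (edge : List (Int × Int)) (out : List (Int × Int)) : Decidable (Spec_find_interior edge out) := by unfold Spec_find_interior; infer_instance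

-- ===== CLAIM (what is proved, stated in full; the proofs are below) =====
def Claim_equal_find_interior : Prop := ∀ (edge : List (Int × Int)), Dom_find_interior edge → Pre_find_interior edge → Spec_find_interior edge (find_interior edge)

-- ===== LEMMAS AND PROOFS =====

-- parity of |{t ∈ L : t ≤ x}| : the scanline "inside" bit at pixel x
def pvIns (L : List Int) (x : Int) : Bool := decide (L.countP (fun t => decide (t ≤ x)) % 2 = 1)

-- run decomposition of a strictly increasing toggle list (clipped at x_max)
def pvFillX (x_max : Int) : List Int → List Int
  | [] => []
  | [a] => PySem.List.pyRange a x_max 1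
  | a :: b :: rest => PySem.List.pyRange a b 1 ++ pvFillX x_max rest

theorem pvCnt_succ (L : List Int) (a : Int) (h : L.Nodup) :
    L.countP (fun t => decide (t ≤ a + 1)) =
      L.countP (fun t => decide (t ≤ a)) + (if a + 1 ∈ L then 1 else 0) := by
  induction L with
  | nil => simp
  | cons b t ih =>
    obtain ⟨hbt, hnd⟩ := List.nodup_cons.mp h
    simp only [List.countP_cons, List.mem_cons]
    rw [ih hnd]
    by_cases hba : b = a + 1
    · subst hba
      simp [hbt, show ¬(a + 1 ≤ a) by omega]
    · have hmem : (a + 1 = b ∨ a + 1 ∈ t) ↔ a + 1 ∈ t :=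
        ⟨fun h' => h'.elim (fun e => absurd e.symm hba) id, Or.inr⟩
      rw [if_congr hmem rfl rfl]
      by_cases hle : b ≤ a <;> by_cases hm : a + 1 ∈ t <;>
        simp [hle, hm, show b ≤ a + 1 ↔ b ≤ a by omega]

theorem pvCnt_init (L : List Int) (a : Int) (h : L.Nodup) (hge : ∀ t ∈ L, a ≤ t) :
    L.countP (fun t => decide (t ≤ a)) = if a ∈ L then 1 else 0 := by
  induction L with
  | nil => simp
  | cons b t ih =>
    obtain ⟨hbt, hnd⟩ := List.nodup_cons.mp h
    have hb := hge b (by simp)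
    have iht := ih hnd (fun u hu => hge u (by simp [hu]))
    simp only [List.countP_cons, List.mem_cons]
    rw [iht]
    by_cases hba : b = a
    · subst hba
      have h1 : ¬ (b ∈ t) := hbt
      simp [h1]
    · have h1 : ¬ b ≤ a := by
        rcases lt_or_eq_of_le hb with h' | h'
        · omega
        · exact absurd h'.symm hba
      have hmem : (a = b ∨ a ∈ t) ↔ a ∈ t :=
        ⟨fun h' => h'.elim (fun e => absurd e.symm hba) id, Or.inr⟩
      rw [if_congr hmem rfl rfl]
      simp [h1]

theorem pvIns_succ (L : List Int) (a : Int) (h : L.Nodup) :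
    pvIns L (a + 1) = (pvIns L a ^^ decide (a + 1 ∈ L)) := by
  unfold pvIns
  rw [pvCnt_succ L a h]
  rcases Nat.mod_two_eq_zero_or_one (L.countP (fun t => decide (t ≤ a))) with h2 | h2 <;>
    by_cases hm : a + 1 ∈ L <;> simp [hm, Nat.add_mod, h2]

theorem pvIns_init (L : List Int) (a : Int) (h : L.Nodup) (hge : ∀ t ∈ L, a ≤ t) :
    pvIns L a = decide (a ∈ L) := by
  unfold pvIns
  rw [pvCnt_init L a h hge]
  by_cases hm : a ∈ L <;> simp [hm]

theorem pvInner (S : PySem.Set (Int × Int)) (y x_max : Int) (L : List Int)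
    (hp : ∀ t, PySem.Set.contains S (t, y) = decide (t ∈ L)) (hnd : L.Nodup) :
    ∀ (k : Nat) (a : Int), (x_max - a).toNat = k → a ≤ x_max → ∀ acc : List (Int × Int),
    (PySem.List.pyRange a x_max 1).foldl
      (fun (st : Bool × List (Int × Int)) x =>
        (st.1 ^^ PySem.Set.contains S (x + 1, y), if st.1 then st.2 ++ [(x, y)] else st.2))
      (pvIns L a, acc)
    = (pvIns L x_max,
       acc ++ ((PySem.List.pyRange a x_max 1).filter (pvIns L)).map (fun x => (x, y))) := by
  intro k
  induction k with
  | zero =>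
    intro a hk ha acc
    have hax : a = x_max := by omega
    subst hax
    rw [PySem.List.pyRange_one_eq_nil le_rfl]
    simp
  | succ n ih =>
    intro a hk ha acc
    have hlt : a < x_max := by omega
    rw [PySem.List.pyRange_one_cons hlt]
    simp only [List.foldl_cons, List.filter_cons]
    rw [hp (a + 1), ← pvIns_succ L a hnd]
    rw [ih (a + 1) (by omega) (by omega)]
    by_cases hia : pvIns L a <;> simp [hia]


theorem pvCore (x_max : Int) (L : List Int) : L.Pairwise (· < ·) →
    ∀ lo : Int, (∀ t ∈ L, lo ≤ t ∧ t ≤ x_max) →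
    (PySem.List.pyRange lo x_max 1).filter (pvIns L) = pvFillX x_max L := by
  induction L using pvFillX.induct with
  | case1 =>
    intro _ lo _
    simp [pvFillX, pvIns, List.filter_eq_nil_iff]
  | case2 a =>
    intro _ lo hb
    obtain ⟨hla, hax⟩ := hb a (by simp)
    rw [PySem.List.pyRange_one_append lo a x_max hla hax, List.filter_append]
    have e1 : (PySem.List.pyRange lo a 1).filter (pvIns [a]) = [] := by
      rw [List.filter_eq_nil_iff]
      intro x hx
      have hx' := PySem.List.mem_pyRange_one.mp hx
      simp [pvIns, show ¬(a ≤ x) by omega]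
    have e2 : (PySem.List.pyRange a x_max 1).filter (pvIns [a]) = PySem.List.pyRange a x_max 1 := by
      rw [List.filter_eq_self]
      intro x hx
      have hx' := PySem.List.mem_pyRange_one.mp hx
      simp [pvIns, show a ≤ x by omega]
    rw [e1, e2]
    simp [pvFillX]
  | case3 a b rest ih =>
    intro hpw lo hb
    obtain ⟨ha1, hpw1⟩ := List.pairwise_cons.mp hpw
    obtain ⟨hb1, hpw2⟩ := List.pairwise_cons.mp hpw1
    have hab : a < b := ha1 b (by simp)
    obtain ⟨hla, hax⟩ := hb a (by simp)
    obtain ⟨_, hbx⟩ := hb b (by simp)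
    have hrb : ∀ t ∈ rest, b ≤ t ∧ t ≤ x_max :=
      fun t ht => ⟨le_of_lt (hb1 t ht), (hb t (by simp [ht])).2⟩
    rw [PySem.List.pyRange_one_append lo a x_max hla hax, List.filter_append,
        PySem.List.pyRange_one_append a b x_max (by omega) hbx, List.filter_append]
    have e1 : (PySem.List.pyRange lo a 1).filter (pvIns (a :: b :: rest)) = [] := by
      rw [List.filter_eq_nil_iff]
      intro x hx
      have hx' := PySem.List.mem_pyRange_one.mp hx
      have hc : (a :: b :: rest).countP (fun t => decide (t ≤ x)) = 0 := by
        rw [List.countP_eq_zero]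
        intro t ht
        rcases List.mem_cons.mp ht with h' | ht'
        · simp [h']; omega
        · rcases List.mem_cons.mp ht' with h' | ht''
          · simp [h']; omega
          · have := hb1 t ht''
            simp; omega
      simp [pvIns, hc]
    have e2 : (PySem.List.pyRange a b 1).filter (pvIns (a :: b :: rest)) = PySem.List.pyRange a b 1 := by
      rw [List.filter_eq_self]
      intro x hx
      have hx' := PySem.List.mem_pyRange_one.mp hx
      have hc0 : rest.countP (fun t => decide (t ≤ x)) = 0 := by
        rw [List.countP_eq_zero]
        intro t ht
        have := hb1 t ht
        simp; omega
      simp [pvIns, hc0, show a ≤ x by omega, show ¬(b ≤ x) by omega]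
    have e3 : (PySem.List.pyRange b x_max 1).filter (pvIns (a :: b :: rest))
        = (PySem.List.pyRange b x_max 1).filter (pvIns rest) := by
      apply List.filter_congr
      intro x hx
      have hx' := PySem.List.mem_pyRange_one.mp hx
      show pvIns (a :: b :: rest) x = pvIns rest x
      unfold pvIns
      rw [List.countP_cons, List.countP_cons,
          if_pos (by simpa using show b ≤ x by omega),
          if_pos (by simpa using show a ≤ x by omega)]
      exact decide_eq_decide.mpr (by omega)
    rw [e1, e2, e3, ih hpw2 b hrb]
    simp [pvFillX]


theorem pvFillRow_eq (x_max y : Int) (L : List Int) : ∀ acc,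
    pvFillRow x_max y L acc = acc ++ (pvFillX x_max L).map (fun x => (x, y)) := by
  induction L using pvFillX.induct with
  | case1 => intro acc; simp [pvFillRow, pvFillX]
  | case2 a =>
    intro acc
    rw [show pvFillRow x_max y [a] acc
          = (PySem.List.pyRange a x_max 1).foldl (fun l x => l ++ [(x, y)]) acc from rfl,
        PySem.List.foldl_append_singleton_eq_map]
    rfl
  | case3 a b rest ih =>
    intro acc
    rw [show pvFillRow x_max y (a :: b :: rest) acc
          = pvFillRow x_max y rest ((PySem.List.pyRange a b 1).foldl (fun l x => l ++ [(x, y)]) acc) from rfl,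
        PySem.List.foldl_append_singleton_eq_map, ih]
    simp [pvFillX]


theorem pvFlatMap_filter {α β : Type} (g : α → List β) (p : α → Bool) :
    ∀ l : List α, (∀ x ∈ l, p x = false → g x = []) → l.flatMap g = (l.filter p).flatMap g := by
  intro l
  induction l with
  | nil => simp
  | cons x t ih =>
    intro h
    by_cases hx : p x
    · simp [hx, ih (fun u hu => h u (by simp [hu]))]
    · have hgx : g x = [] := h x (by simp) (by simpa using hx)
      simp [hx, hgx, ih (fun u hu => h u (by simp [hu]))]


theorem pvEq_of_pairwise_lt (l₁ : List Int) : ∀ l₂ : List Int, l₁.Pairwise (· < ·) →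
    l₂.Pairwise (· < ·) → (∀ x, x ∈ l₁ ↔ x ∈ l₂) → l₁ = l₂ := by
  induction l₁ with
  | nil =>
    intro l₂ _ _ hm
    cases l₂ with
    | nil => rfl
    | cons b s => exact absurd ((hm b).mpr (by simp)) (by simp)
  | cons a t ih =>
    intro l₂ h1 h2 hm
    cases l₂ with
    | nil => exact absurd ((hm a).mp (by simp)) (by simp)
    | cons b s =>
      obtain ⟨ha1, hpt⟩ := List.pairwise_cons.mp h1
      obtain ⟨hb1, hps⟩ := List.pairwise_cons.mp h2
      have hab : a = b := by
        rcases List.mem_cons.mp ((hm a).mp (by simp)) with h' | h'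
        · exact h'
        · rcases List.mem_cons.mp ((hm b).mpr (by simp)) with h'' | h''
          · exact h''.symm
          · have := hb1 a h'
            have := ha1 b h''
            omega
      subst hab
      have htl : ∀ x, x ∈ t ↔ x ∈ s := by
        intro x
        constructor
        · intro hx
          rcases List.mem_cons.mp ((hm x).mp (by simp [hx])) with h' | h'
          · exact absurd h'.symm (ne_of_lt (ha1 x hx))
          · exact h'
        · intro hx
          rcases List.mem_cons.mp ((hm x).mpr (by simp [hx])) with h' | h'
          · exact absurd h'.symm (ne_of_lt (hb1 x hx))
          · exact h'
      rw [ih s hpt hps htl]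


theorem pvLrow_mem (S : PySem.Set (Int × Int)) (y t : Int) :
    t ∈ PySem.List.sorted ((S.filter (fun p => p.2 == y)).map Prod.fst) (fun v => v) false
      ↔ (t, y) ∈ S := by
  rw [PySem.List.mem_sorted]
  constructor
  · intro h
    obtain ⟨p, hp, he⟩ := List.mem_map.mp h
    obtain ⟨hpS, hpy⟩ := List.mem_filter.mp hp
    have hp2 : p.2 = y := by simpa using hpy
    have : p = (t, y) := by
      obtain ⟨p1, p2⟩ := p
      simp_all
    exact this ▸ hpS
  · intro h
    exact List.mem_map.mpr ⟨(t, y), List.mem_filter.mpr ⟨h, by simp⟩, rfl⟩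

theorem pvLrow_nodup (S : PySem.Set (Int × Int)) (hnd : S.Nodup) (y : Int) :
    (PySem.List.sorted ((S.filter (fun p => p.2 == y)).map Prod.fst) (fun v => v) false).Nodup := by
  apply List.Perm.nodup (PySem.List.sorted_perm _ _ _).symm
  apply List.Nodup.map_on ?_ (hnd.filter _)
  intro p hp q hq he
  have hp2 : p.2 = y := by simpa using (List.mem_filter.mp hp).2
  have hq2 : q.2 = y := by simpa using (List.mem_filter.mp hq).2
  obtain ⟨p1, p2⟩ := p
  obtain ⟨q1, q2⟩ := q
  simp_all

theorem pvLrow_pairwise (S : PySem.Set (Int × Int)) (hnd : S.Nodup) (y : Int) :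
    (PySem.List.sorted ((S.filter (fun p => p.2 == y)).map Prod.fst) (fun v => v) false).Pairwise (· < ·) := by
  have h1 := PySem.List.sorted_pairwise ((S.filter (fun p => p.2 == y)).map Prod.fst) (fun v => v)
  have h2 := pvLrow_nodup S hnd y
  exact (h1.and h2).imp (fun h => lt_of_le_of_ne h.1 h.2)

theorem pvMain (edge : List (Int × Int)) (S : PySem.Set (Int × Int))
    (x_min y_min x_max y_max : Int)
    (hSnodup : S.Nodup) (hSedge : ∀ q ∈ S, q ∈ edge)
    (hbnd : ∀ q ∈ edge, x_min ≤ q.1 ∧ q.1 ≤ x_max ∧ y_min ≤ q.2 ∧ q.2 ≤ y_max)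
    (hxmM : x_min ≤ x_max) :
    (PySem.List.pyRange y_min y_max 1).foldl (fun interior y =>
        ((PySem.List.pyRange x_min x_max 1).foldl
          (fun (st : Bool × List (Int × Int)) x =>
            (st.1 ^^ PySem.Set.contains S (x + 1, y),
             if st.1 then st.2 ++ [(x, y)] else st.2))
          (PySem.Set.contains S (x_min, y), interior)).2) []
    = (PySem.List.sorted
         (PySem.Set.ofList ((S.filter (fun p => decide (p.2 < y_max))).map Prod.snd))
         (fun v => v) false).foldl (fun interior y =>
        pvFillRow x_max y
          (PySem.List.sorted ((S.filter (fun p => p.2 == y)).map Prod.fst) (fun v => v) false)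
          interior) [] := by
  have hcont : ∀ q : Int × Int, PySem.Set.contains S q = decide (q ∈ S) := by
    intro q
    by_cases h : q ∈ S
    · rw [(PySem.Set.contains_iff S q).mpr h, decide_eq_true h]
    · have hne : PySem.Set.contains S q ≠ true := fun hc => h ((PySem.Set.contains_iff S q).mp hc)
      rw [Bool.eq_false_iff.mpr hne, decide_eq_false h]
  -- row facts
  have hA : ∀ (acc : List (Int × Int)), ∀ y ∈ PySem.List.pyRange y_min y_max 1,
      ((PySem.List.pyRange x_min x_max 1).foldl
        (fun (st : Bool × List (Int × Int)) x =>
          (st.1 ^^ PySem.Set.contains S (x + 1, y),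
           if st.1 then st.2 ++ [(x, y)] else st.2))
        (PySem.Set.contains S (x_min, y), acc)).2
      = acc ++ (pvFillX x_max
          (PySem.List.sorted ((S.filter (fun p => p.2 == y)).map Prod.fst) (fun v => v) false)).map
            (fun x => (x, y)) := by
    intro acc y _
    set L := PySem.List.sorted ((S.filter (fun p => p.2 == y)).map Prod.fst) (fun v => v) false with hL
    have hp : ∀ t, PySem.Set.contains S (t, y) = decide (t ∈ L) := by
      intro t
      rw [hcont, decide_eq_decide.mpr (pvLrow_mem S y t).symm]
    have hnd : L.Nodup := pvLrow_nodup S hSnodup y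
    have hpw : L.Pairwise (· < ·) := pvLrow_pairwise S hSnodup y
    have hbounds : ∀ t ∈ L, x_min ≤ t ∧ t ≤ x_max := by
      intro t ht
      have hm := hbnd (t, y) (hSedge (t, y) ((pvLrow_mem S y t).mp ht))
      exact ⟨hm.1, hm.2.1⟩
    rw [show PySem.Set.contains S (x_min, y) = pvIns L x_min from by
          rw [hp x_min, ← pvIns_init L x_min hnd (fun t ht => (hbounds t ht).1)]]
    rw [pvInner S y x_max L hp hnd (x_max - x_min).toNat x_min rfl hxmM acc]
    rw [pvCore x_max L hpw x_min hbounds]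
  rw [PySem.List.foldl_congr_mem _ _
      (fun (interior : List (Int × Int)) (y : Int) => interior ++ (pvFillX x_max
          (PySem.List.sorted ((S.filter (fun p => p.2 == y)).map Prod.fst) (fun v => v) false)).map
            (fun x => (x, y))) [] hA]
  rw [PySem.List.foldl_congr_mem _ _
      (fun (interior : List (Int × Int)) (y : Int) => interior ++ (pvFillX x_max
          (PySem.List.sorted ((S.filter (fun p => p.2 == y)).map Prod.fst) (fun v => v) false)).map
            (fun x => (x, y))) []
      (fun acc y _ => pvFillRow_eq x_max y _ acc)]
  rw [PySem.List.foldl_append_eq_flatMap, PySem.List.foldl_append_eq_flatMap]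
  simp only [List.nil_append]
  -- bridge: flatMap over the full y-range = flatMap over the sorted present rows
  set gRow : Int → List (Int × Int) := fun y => (pvFillX x_max
      (PySem.List.sorted ((S.filter (fun p => p.2 == y)).map Prod.fst) (fun v => v) false)).map
        (fun x => (x, y)) with hg
  set ysE := PySem.List.sorted
      (PySem.Set.ofList ((S.filter (fun p => decide (p.2 < y_max))).map Prod.snd))
      (fun v => v) false with hys
  have hys_pw : ysE.Pairwise (· < ·) := PySem.List.sorted_ofList_pairwise_lt _
  have hys_mem : ∀ v, v ∈ ysE ↔ ∃ q ∈ S, q.2 = v ∧ v < y_max := by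
    intro v
    rw [hys, PySem.List.mem_sorted, PySem.Set.mem_ofList]
    constructor
    · intro h
      obtain ⟨q, hq, he⟩ := List.mem_map.mp h
      obtain ⟨hqS, hlt⟩ := List.mem_filter.mp hq
      exact ⟨q, hqS, he, he ▸ of_decide_eq_true hlt⟩
    · rintro ⟨q, hqS, rfl, hlt⟩
      exact List.mem_map.mpr ⟨q, List.mem_filter.mpr ⟨hqS, decide_eq_true hlt⟩, rfl⟩
  have hoff : ∀ y ∈ PySem.List.pyRange y_min y_max 1,
      (fun v => decide (v ∈ ysE)) y = false → gRow y = [] := by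
    intro y hy hfalse
    have hylt : y < y_max := (PySem.List.mem_pyRange_one.mp hy).2
    have hLnil : PySem.List.sorted ((S.filter (fun p => p.2 == y)).map Prod.fst) (fun v => v) false = [] := by
      rw [List.eq_nil_iff_forall_not_mem]
      intro t ht
      have hty : (t, y) ∈ S := (pvLrow_mem S y t).mp ht
      have : y ∈ ysE := (hys_mem y).mpr ⟨(t, y), hty, rfl, hylt⟩
      simp [this] at hfalse
    rw [hg]
    simp [hLnil, pvFillX]
  have hfilt : (PySem.List.pyRange y_min y_max 1).filter (fun v => decide (v ∈ ysE)) = ysE := by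
    apply pvEq_of_pairwise_lt
    · exact (PySem.List.pairwise_lt_pyRange_one y_min y_max).filter _
    · exact hys_pw
    · intro v
      rw [List.mem_filter]
      constructor
      · rintro ⟨_, h⟩
        exact of_decide_eq_true h
      · intro hv
        refine ⟨?_, decide_eq_true hv⟩
        obtain ⟨q, hqS, hq2, hlt⟩ := (hys_mem v).mp hv
        have hq := hbnd q (hSedge q hqS)
        exact PySem.List.mem_pyRange_one.mpr ⟨hq2 ▸ hq.2.2.1, hlt⟩
  rw [pvFlatMap_filter gRow (fun v => decide (v ∈ ysE)) _ hoff, hfilt]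

-- ===== VERDICT (by name: the statement is the Claim_ definition above) =====
theorem find_interior_spec : Claim_equal_find_interior := by
  intro edge _hdom hpre
  have hpre' : edge ≠ [] := hpre
  unfold Spec_find_interior find_interior find_interior_alt
  have hfst : edge.map Prod.fst ≠ [] := by simpa using hpre'
  have hsnd : edge.map Prod.snd ≠ [] := by simpa using hpre'
  obtain ⟨x_min, hxmin⟩ : ∃ v, PySem.List.min? (edge.map Prod.fst) (fun v => v) = some v :=
    Option.ne_none_iff_exists'.mp (by rw [Ne, PySem.List.min?_eq_none_iff]; exact hfst)
  obtain ⟨y_min, hymin⟩ : ∃ v, PySem.List.min? (edge.map Prod.snd) (fun v => v) = some v :=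
    Option.ne_none_iff_exists'.mp (by rw [Ne, PySem.List.min?_eq_none_iff]; exact hsnd)
  obtain ⟨x_max, hxmax⟩ : ∃ v, PySem.List.max? (edge.map Prod.fst) (fun v => v) = some v :=
    Option.ne_none_iff_exists'.mp (by rw [Ne, PySem.List.max?_eq_none_iff]; exact hfst)
  obtain ⟨y_max, hymax⟩ : ∃ v, PySem.List.max? (edge.map Prod.snd) (fun v => v) = some v :=
    Option.ne_none_iff_exists'.mp (by rw [Ne, PySem.List.max?_eq_none_iff]; exact hsnd)
  obtain ⟨last, hlast⟩ : ∃ v, PySem.List.pyGet? edge (-1) = some v := by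
    rw [PySem.List.pyGet?_neg_one]
    exact Option.ne_none_iff_exists'.mp (by simpa using hpre')
  rw [hxmin, hymin, hxmax, hymax, hlast]
  have hlastmem : last ∈ edge := by
    rw [PySem.List.pyGet?_neg_one] at hlast
    exact List.mem_of_getLast? hlast
  apply pvMain edge
      (PySem.Set.ofList (((edge.zip (edge.tail ++ [last])).filter
        (fun sd => sd.1.1 == sd.2.1)).map (fun sd => if sd.1.2 < sd.2.2 then sd.1 else sd.2)))
      x_min y_min x_max y_max (PySem.Set.nodup_ofList _)
  · -- every boundary point is a vertex of edge
    intro q hq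
    rw [PySem.Set.mem_ofList] at hq
    obtain ⟨sd, hsd, hq'⟩ := List.mem_map.mp hq
    have hzip : (sd.1, sd.2) ∈ edge.zip (edge.tail ++ [last]) := by
      simpa using (List.mem_filter.mp hsd).1
    obtain ⟨h1, h2⟩ := List.of_mem_zip hzip
    have h2' : sd.2 ∈ edge := by
      rcases List.mem_append.mp h2 with h | h
      · exact List.mem_of_mem_tail h
      · have : sd.2 = last := by simpa using h
        exact this ▸ hlastmem
    by_cases hc : sd.1.2 < sd.2.2
    · rw [← hq', if_pos hc]; exact h1
    · rw [← hq', if_neg hc]; exact h2'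
  · -- bounding box bounds
    intro q hq
    exact ⟨PySem.List.min?_isMin hxmin q.1 (List.mem_map_of_mem hq),
           PySem.List.max?_isMax hxmax q.1 (List.mem_map_of_mem hq),
           PySem.List.min?_isMin hymin q.2 (List.mem_map_of_mem hq),
           PySem.List.max?_isMax hymax q.2 (List.mem_map_of_mem hq)⟩
  · -- x_min ≤ x_max
    obtain ⟨q0, hq0⟩ := List.exists_mem_of_ne_nil edge hpre'
    exact le_trans (PySem.List.min?_isMin hxmin q0.1 (List.mem_map_of_mem hq0))
                   (PySem.List.max?_isMax hxmax q0.1 (List.mem_map_of_mem hq0))
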